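-- pv_equiv track=rewrite | github.com/torrejoNia/A-maze-ing_42Lisboa | render.py | _directions_to_cells
-- ===== SOURCE A (Python) =====
-- DIR_DELTA: dict[str, tuple[int, int]] = {
--     "N": (-1, 0),
--     "E": (0, +1),
--     "S": (+1, 0),
--     "W": (0, -1),
-- }
--
-- def _directions_to_cells(
--     start: tuple[int, int],
--     directions: str
-- ) -> list[tuple[int, int]]:
--     """Convert a direction string into a list of cell coordinates.
--
--     Args:
--         start (tuple[int, int]): Starting cell as (row, col).
--         directions (str): Sequence of cardinal letters, e.g. "NENW".
--
--     Returns: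
--         list[tuple[int, int]]: Ordered cell coordinates of the path,
--             including the start cell.
--     """
--     result: list[tuple[int, int]] = [start]
--     current_row: int = start[0]
--     current_col: int = start[1]
--
--     for dir in directions:
--         row_delta: int = DIR_DELTA[dir][0]
--         col_delta: int = DIR_DELTA[dir][1]
--         current_row += row_delta
--         current_col += col_delta
--         result.append((current_row, current_col))
--     return result
-- ===== SOURCE B (Python) =====
-- def _directions_to_cells(start, directions):
--     # Each cell is computed independently of the others: the net displacement
--     # after i steps is (#S - #N, #E - #W) over the first i letters.
--     cells = []
--     for i in range(len(directions) + 1):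
--         prefix = directions[:i]
--         cells.append((
--             start[0] + prefix.count("S") - prefix.count("N"),
--             start[1] + prefix.count("E") - prefix.count("W"),
--         ))
--     return cells
-- ===== Notes on version B (the rewrite author's own statement) =====
-- stated objective: alternative
-- what changed: Instead of propagating a running (row, col) position letter by letter, B computes every cell directly and independently as start plus the net displacement (#S-#N, #E-#W) of the corresponding direction-string prefix, using str.count; no running state is carried between cells.
import Mathlib
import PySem

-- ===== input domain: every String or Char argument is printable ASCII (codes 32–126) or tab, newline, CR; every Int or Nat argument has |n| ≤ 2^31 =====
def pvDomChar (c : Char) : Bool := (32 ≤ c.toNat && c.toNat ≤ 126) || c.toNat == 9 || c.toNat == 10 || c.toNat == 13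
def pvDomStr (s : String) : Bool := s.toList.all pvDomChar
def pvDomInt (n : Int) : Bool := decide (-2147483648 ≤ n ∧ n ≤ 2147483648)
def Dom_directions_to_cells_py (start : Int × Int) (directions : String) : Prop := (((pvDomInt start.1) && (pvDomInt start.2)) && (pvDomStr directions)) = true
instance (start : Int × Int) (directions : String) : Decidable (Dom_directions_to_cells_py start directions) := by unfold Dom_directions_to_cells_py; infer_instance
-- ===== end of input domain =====

-- B drops A's running-position loop entirely: each cell is computed independently as
-- start plus the net letter counts (#S-#N, #E-#W) of the corresponding prefix (alternative).

-- shared module constant DIR_DELTA, as a total lookup (only A's port uses it); for letters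
-- outside "NESW" Python's DIR_DELTA[dir] raises KeyError — excluded by Pre_ below.
def dirDelta (c : Char) : Int × Int :=
  if c = 'N' then (-1, 0)
  else if c = 'E' then (0, 1)
  else if c = 'S' then (1, 0)
  else (0, -1)

-- ===== PORT A =====
-- literal port: result list built by appending, with running current_row/current_col
def directions_to_cells_py (start : Int × Int) (directions : String) : List (Int × Int) :=
  let st := directions.toList.foldl
    (fun (st : List (Int × Int) × Int × Int) (dir : Char) =>
      let rowDelta := (dirDelta dir).1
      let colDelta := (dirDelta dir).2
      let r := st.2.1 + rowDelta
      let c := st.2.2 + colDelta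
      (st.1 ++ [(r, c)], r, c))
    ([start], start.1, start.2)
  st.1

-- ===== PORT B =====
-- for i in range(len+1): prefix = directions[:i]; cell from str.count of the prefix
def directions_to_cells_py_alt (start : Int × Int) (directions : String) : List (Int × Int) :=
  (PySem.List.pyRange 0 (directions.toList.length + 1) 1).map (fun i =>
    let pfx := PySem.Chars.slice directions.toList none (some i)
    (start.1 + (PySem.Chars.count pfx ['S'] : Int) - (PySem.Chars.count pfx ['N'] : Int),
     start.2 + (PySem.Chars.count pfx ['E'] : Int) - (PySem.Chars.count pfx ['W'] : Int)))

-- ===== PRECONDITION & SPEC =====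
-- Pre_ excludes exactly the inputs where Python A raises KeyError (a letter outside "NESW").
def Pre_directions_to_cells_py (start : Int × Int) (directions : String) : Prop :=
  directions.toList.all (fun c => c == 'N' || c == 'E' || c == 'S' || c == 'W') = true
instance (start : Int × Int) (directions : String) : Decidable (Pre_directions_to_cells_py start directions) := by unfold Pre_directions_to_cells_py; infer_instance
def pvWitness_directions_to_cells_py : (Int × Int) × String := ((0, 0), "NE")

def Spec_directions_to_cells_py (start : Int × Int) (directions : String) (out : List (Int × Int)) : Prop := out = directions_to_cells_py_alt start directions
instance (start : Int × Int) (directions : String) (out : List (Int × Int)) : Decidable (Spec_directions_to_cells_py start directions out) := by unfold Spec_directions_to_cells_py; infer_instance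

-- ===== CLAIM (what is proved, stated in full; the proofs are below) =====
def Claim_equal_directions_to_cells_py : Prop := ∀ (start : Int × Int) (directions : String), Dom_directions_to_cells_py start directions → Pre_directions_to_cells_py start directions → Spec_directions_to_cells_py start directions (directions_to_cells_py start directions)

-- ===== LEMMAS AND PROOFS =====

-- the scan both sides describe, used only inside the proof as the common reference point
def accumCells (cur : Int × Int) : List (Int × Int) → List (Int × Int)
  | [] => [cur]
  | d :: ds => cur :: accumCells (cur.1 + d.1, cur.2 + d.2) ds

theorem accumCells_head (cur : Int × Int) (ds : List (Int × Int)) :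
    ∃ t, accumCells cur ds = cur :: t := by
  cases ds <;> exact ⟨_, rfl⟩

-- loop invariant for A's fold: the accumulated list is the prefix followed by the scan's tail
theorem foldl_eq_accum (cs : List Char) (acc : List (Int × Int)) (r c : Int) :
    (cs.foldl
      (fun (st : List (Int × Int) × Int × Int) (dir : Char) =>
        let rowDelta := (dirDelta dir).1
        let colDelta := (dirDelta dir).2
        let r := st.2.1 + rowDelta
        let c := st.2.2 + colDelta
        (st.1 ++ [(r, c)], r, c))
      (acc ++ [(r, c)], r, c)).1 = acc ++ accumCells (r, c) (cs.map dirDelta) := by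
  induction cs generalizing acc r c with
  | nil => simp [accumCells]
  | cons d ds ih =>
    simp only [List.foldl_cons, List.map_cons]
    rw [show acc ++ [(r, c)] ++ [(r + (dirDelta d).1, c + (dirDelta d).2)]
        = (acc ++ [(r, c)]) ++ [(r + (dirDelta d).1, c + (dirDelta d).2)] from by simp]
    rw [ih]
    obtain ⟨t, ht⟩ := accumCells_head (r + (dirDelta d).1, c + (dirDelta d).2) (ds.map dirDelta)
    simp [accumCells, ht]

-- Python str.count of a single-character needle is List.count
theorem chars_count_singleton (cs : List Char) (v : Char) :
    PySem.Chars.count cs [v] = cs.count v := by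
  show PySem.Chars.count.go [v] cs.length cs 0 = cs.count v
  suffices h : ∀ (fuel : Nat) (l : List Char) (a : Nat), l.length ≤ fuel →
      PySem.Chars.count.go [v] fuel l a = a + l.count v by
    simpa using h cs.length cs 0 le_rfl
  intro fuel
  induction fuel with
  | zero =>
    intro l a h
    cases l with
    | nil => simp [PySem.Chars.count.go]
    | cons x t => simp at h
  | succ n ih =>
    intro l a h
    cases l with
    | nil => simp [PySem.Chars.count.go]
    | cons x t =>
      by_cases hx : v = x
      · subst hx
        have hih := ih t (a+1) (by simpa using h)
        simp [PySem.Chars.count.go, List.isPrefixOf, hih]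
        omega
      · simp [PySem.Chars.count.go, List.isPrefixOf, hx, Ne.symm hx,
          ih t a (by simpa using h)]

-- net-displacement characterisation of the scan, for valid letters only
theorem accum_eq_counts (cs : List Char)
    (hv : cs.all (fun c => c == 'N' || c == 'E' || c == 'S' || c == 'W') = true)
    (r c : Int) :
    accumCells (r, c) (cs.map dirDelta)
      = (List.range (cs.length + 1)).map (fun k =>
          (r + ((cs.take k).count 'S' : Int) - ((cs.take k).count 'N' : Int),
           c + ((cs.take k).count 'E' : Int) - ((cs.take k).count 'W' : Int))) := by
  induction cs generalizing r c with
  | nil => simp [accumCells, List.range_succ]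
  | cons a as ih =>
    simp only [List.all_cons, Bool.and_eq_true] at hv
    rw [List.map_cons, show (a :: as).length + 1 = (as.length + 1) + 1 from rfl,
      List.range_succ_eq_map, List.map_cons, List.map_map]
    show accumCells (r, c) _ = (r + _ - _, c + _ - _) :: _
    have hstep : accumCells (r, c) (dirDelta a :: as.map dirDelta)
        = (r, c) :: accumCells (r + (dirDelta a).1, c + (dirDelta a).2) (as.map dirDelta) := rfl
    rw [hstep, ih hv.2]
    congr 1
    · simp
    · rw [List.range_succ_eq_map] at *
      apply List.map_congr_left
      intro k _
      have ha := hv.1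
      simp only [Bool.or_eq_true, beq_iff_eq] at ha
      rcases ha with ((h | h) | h) | h <;>
        subst h <;>
        simp [dirDelta, Function.comp, Prod.ext_iff] <;> omega

-- B's port, rewritten to the same closed form
theorem alt_eq_counts (start : Int × Int) (directions : String) :
    directions_to_cells_py_alt start directions
      = (List.range (directions.toList.length + 1)).map (fun k =>
          (start.1 + ((directions.toList.take k).count 'S' : Int) - ((directions.toList.take k).count 'N' : Int),
           start.2 + ((directions.toList.take k).count 'E' : Int) - ((directions.toList.take k).count 'W' : Int))) := by
  unfold directions_to_cells_py_alt
  rw [PySem.List.pyRange_one]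
  simp only [Int.sub_zero, List.map_map]
  apply List.map_congr_left
  intro k hk
  simp only [Function.comp_apply, Int.zero_add]
  simp [PySem.Chars.slice, PySem.List.slice_to_natCast, chars_count_singleton]

-- ===== VERDICT (by name: the statement is the Claim_ definition above) =====
theorem directions_to_cells_py_spec : Claim_equal_directions_to_cells_py := by
  intro start directions _ hpre
  unfold Spec_directions_to_cells_py directions_to_cells_py
  rw [alt_eq_counts, ← accum_eq_counts directions.toList hpre start.1 start.2]
  have h := foldl_eq_accum directions.toList [] start.1 start.2
  simpa using h
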